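-- pv_equiv track=rewrite | github.com/wlctatalc/split_image | gui_split_image.py | build_slices
-- ===== SOURCE A (Python) =====
-- def build_slices(total: int, sizes, append_remainder: bool, clip_excess: bool):
--     # 复制 split_image 中的逻辑以避免循环依赖（该函数在 GUI 内部使用）
--     sum_sizes = sum(sizes)
--     slices = []
--     start = 0
--
--     if sum_sizes > total:
--         if not clip_excess:
--             raise ValueError(f"指定像素总和({sum_sizes})超过图像尺寸({total})，可勾选“超过裁边”以允许裁边")
--         for i, sz in enumerate(sizes):
--             end = start + sz
--             if end > total:
--                 end = total
--             if end <= start: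
--                 break
--             slices.append((start, end))
--             start = end
--             if start >= total:
--                 break
--         return slices
--
--     for sz in sizes:
--         end = start + sz
--         slices.append((start, end))
--         start = end
--
--     if sum_sizes < total and append_remainder:
--         slices.append((start, total))
--
--     slices = [(s, e) for (s, e) in slices if e > s]
--     return slices
-- ===== SOURCE B (Python) =====
-- def build_slices(total: int, sizes, append_remainder: bool, clip_excess: bool):
--     # Different decomposition: the normal branch builds the output BACK-TO-FRONT
--     # from the total running sum, fusing the e>s filter and the remainder slice
--     # into construction; the clip branch is a guard-first scan over unclamped
--     # boundaries with min-clamping (no post-checks, no filter pass).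
--     sum_sizes = sum(sizes)
--
--     if sum_sizes > total:
--         if not clip_excess:
--             raise ValueError(f"指定像素总和({sum_sizes})超过图像尺寸({total})，可勾选“超过裁边”以允许裁边")
--         out = []
--         bound = 0
--         for sz in sizes:
--             if sz <= 0 or bound >= total:
--                 break
--             out.append((bound, min(bound + sz, total)))
--             bound += sz
--         return out
--
--     out = [(sum_sizes, total)] if append_remainder and sum_sizes < total else []
--     end = sum_sizes
--     for sz in reversed(sizes):
--         if sz > 0:
--             out.append((end - sz, end))
--         end -= sz
--     out.reverse()
--     return out
-- ===== Notes on version B (the rewrite author's own statement) =====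
-- stated objective: alternative
-- what changed: B builds the normal-branch slice list back-to-front from the total running sum (reversed scan, then one reverse), fusing the e>s filter and the remainder slice into construction instead of A's forward append loop plus post-hoc remainder append and filter pass; the clip branch becomes a guard-first scan over unclamped boundaries with min-clamping instead of A's clamp-append-then-double-post-check loop.
-- outside the precondition, e.g. on build_slices(10, [4, 8], False, False): A raises ValueError, B raises ValueError
import Mathlib
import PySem

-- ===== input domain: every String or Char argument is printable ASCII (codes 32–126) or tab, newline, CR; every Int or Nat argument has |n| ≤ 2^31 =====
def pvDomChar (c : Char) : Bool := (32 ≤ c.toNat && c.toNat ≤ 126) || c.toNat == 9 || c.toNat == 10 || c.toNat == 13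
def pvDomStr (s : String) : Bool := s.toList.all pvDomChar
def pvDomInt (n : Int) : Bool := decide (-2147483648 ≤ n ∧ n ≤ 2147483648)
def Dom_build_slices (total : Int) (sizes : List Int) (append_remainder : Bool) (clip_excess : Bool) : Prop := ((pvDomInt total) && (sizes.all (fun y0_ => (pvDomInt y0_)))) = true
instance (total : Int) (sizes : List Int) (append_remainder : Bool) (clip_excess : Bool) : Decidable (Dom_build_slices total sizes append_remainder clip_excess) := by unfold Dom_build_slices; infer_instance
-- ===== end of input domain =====

-- B builds the normal-branch output back-to-front from the total running sum,
-- fusing the e>s filter and the remainder slice into construction, and clips with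
-- a guard-first min-clamping scan; return-value equivalence only. A raises
-- ValueError when sum(sizes) > total and not clip_excess (excluded by Pre_).

-- ===== PORT A =====

-- A's clip loop: end = start + sz, clamp to total, break if end <= start,
-- append, start = end, break if start >= total.
def pvClipA (total : Int) : List Int → Int → List (Int × Int)
  | [], _ => []
  | sz :: rest, start =>
    let e0 := start + sz
    let e := if e0 > total then total else e0
    if e ≤ start then []
    else if e ≥ total then [(start, e)]
    else (start, e) :: pvClipA total rest e

-- A's normal loop: returns (slices, final start).
def pvLoopA : List Int → Int → (List (Int × Int) × Int)
  | [], start => ([], start)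
  | sz :: rest, start =>
    let r := pvLoopA rest (start + sz)
    ((start, start + sz) :: r.1, r.2)

def build_slices (total : Int) (sizes : List Int) (append_remainder : Bool) (clip_excess : Bool) : List (Int × Int) :=
  let sum_sizes := sizes.foldl (· + ·) 0
  if sum_sizes > total then
    if !clip_excess then []  -- Python raises ValueError here; excluded by Pre_build_slices
    else pvClipA total sizes 0
  else
    let r := pvLoopA sizes 0
    let slices := if sum_sizes < total ∧ append_remainder = true then r.1 ++ [(r.2, total)] else r.1
    slices.filter (fun p => p.2 > p.1)

-- ===== PORT B =====

-- B's clip loop: guard first (non-positive size or boundary past total → break),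
-- emit the min-clamped slice, advance the UNclamped boundary.
def pvClipB (total : Int) : List Int → Int → List (Int × Int)
  | [], _ => []
  | sz :: rest, bound =>
    if sz ≤ 0 ∨ bound ≥ total then []
    else (bound, min (bound + sz) total) :: pvClipB total rest (bound + sz)

-- B's backward loop: for sz in reversed(sizes): append (end-sz, end) if sz>0; end -= sz.
def pvWalkRevLoop : List Int → Int → List (Int × Int) → List (Int × Int)
  | [], _, out => out
  | sz :: rest, e, out =>
    pvWalkRevLoop rest (e - sz) (if sz > 0 then out ++ [(e - sz, e)] else out)

def build_slices_alt (total : Int) (sizes : List Int) (append_remainder : Bool) (clip_excess : Bool) : List (Int × Int) :=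
  let sum_sizes := sizes.foldl (· + ·) 0
  if sum_sizes > total then
    if !clip_excess then []  -- Python raises ValueError here; excluded by Pre_build_slices
    else pvClipB total sizes 0
  else
    let out := if append_remainder = true ∧ sum_sizes < total then [(sum_sizes, total)] else []
    (pvWalkRevLoop sizes.reverse sum_sizes out).reverse

-- ===== PRECONDITION & SPEC =====
-- Pre_ excludes exactly the inputs where A raises ValueError: sum(sizes) > total with clip_excess false.
def Pre_build_slices (total : Int) (sizes : List Int) (append_remainder : Bool) (clip_excess : Bool) : Prop :=
  sizes.foldl (· + ·) 0 ≤ total ∨ clip_excess = true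
instance (total : Int) (sizes : List Int) (append_remainder : Bool) (clip_excess : Bool) : Decidable (Pre_build_slices total sizes append_remainder clip_excess) := by unfold Pre_build_slices; infer_instance

def pvWitness_build_slices : Int × List Int × Bool × Bool := (10, [3, 4], true, false)

def Spec_build_slices (total : Int) (sizes : List Int) (append_remainder : Bool) (clip_excess : Bool) (out : List (Int × Int)) : Prop := out = build_slices_alt total sizes append_remainder clip_excess
instance (total : Int) (sizes : List Int) (append_remainder : Bool) (clip_excess : Bool) (out : List (Int × Int)) : Decidable (Spec_build_slices total sizes append_remainder clip_excess out) := by unfold Spec_build_slices; infer_instance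

-- ===== CLAIM (what is proved, stated in full; the proofs are below) =====
def Claim_equal_build_slices : Prop := ∀ (total : Int) (sizes : List Int) (append_remainder : Bool) (clip_excess : Bool), Dom_build_slices total sizes append_remainder clip_excess → Pre_build_slices total sizes append_remainder clip_excess → Spec_build_slices total sizes append_remainder clip_excess (build_slices total sizes append_remainder clip_excess)

-- ===== LEMMAS AND PROOFS =====

-- Past the total, B's clip loop emits nothing.
theorem pvClipB_past (total : Int) (l : List Int) (bound : Int) (h : bound ≥ total) :
    pvClipB total l bound = [] := by
  cases l with
  | nil => rfl
  | cons sz rest => simp [pvClipB, h]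

-- A's clip loop equals B's clip loop.
theorem pvClip_eq (total : Int) (sizes : List Int) (start : Int) :
    pvClipA total sizes start = pvClipB total sizes start := by
  induction sizes generalizing start with
  | nil => rfl
  | cons sz rest ih =>
    simp only [pvClipA, pvClipB]
    by_cases hstop : sz ≤ 0 ∨ start ≥ total
    · have h1 : (if start + sz > total then total else start + sz) ≤ start := by omega
      simp [h1, hstop]
    · rw [not_or, not_le, not_le] at hstop
      have h1 : ¬ (if start + sz > total then total else start + sz) ≤ start := by omega
      simp only [if_neg h1, if_neg (by simpa using hstop : ¬ (sz ≤ 0 ∨ start ≥ total))]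
      by_cases h2 : (if start + sz > total then total else start + sz) ≥ total
      · have he : (if start + sz > total then total else start + sz) = total := by omega
        have hm : min (start + sz) total = total := by omega
        rw [he, hm, pvClipB_past total rest (start + sz) (by omega)]
        simp
      · have he : (if start + sz > total then total else start + sz) = start + sz := by omega
        have hm : min (start + sz) total = start + sz := by omega
        simp [he, hm, ih]
        intro hle
        exact absurd hle (by omega)

-- A's normal loop's final start is the running sum.
theorem pvLoopA_snd (sizes : List Int) (start : Int) :
    (pvLoopA sizes start).2 = sizes.foldl (· + ·) start := by
  induction sizes generalizing start with
  | nil => rfl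
  | cons sz rest ih => simp [pvLoopA, List.foldl, ih]

-- Functional view of B's backward loop (proof helper).
def pvBackward : List Int → Int → List (Int × Int)
  | [], _ => []
  | sz :: rest, e => (if sz > 0 then [(e - sz, e)] else []) ++ pvBackward rest (e - sz)

theorem pvWalkRevLoop_eq (l : List Int) (e : Int) (out : List (Int × Int)) :
    pvWalkRevLoop l e out = out ++ pvBackward l e := by
  induction l generalizing e out with
  | nil => simp [pvWalkRevLoop, pvBackward]
  | cons sz rest ih =>
    simp only [pvWalkRevLoop, pvBackward, ih]
    by_cases h : sz > 0 <;> simp [h]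

theorem foldl_add_shift (l : List Int) (a b : Int) :
    List.foldl (· + ·) (a + b) l = a + List.foldl (· + ·) b l := by
  induction l generalizing b with
  | nil => rfl
  | cons sz rest ih =>
    simp only [List.foldl]
    rw [add_assoc, ih]

theorem foldl_add_reverse (l : List Int) :
    List.foldl (· + ·) (0 : Int) l.reverse = List.foldl (· + ·) 0 l := by
  induction l with
  | nil => rfl
  | cons sz rest ih =>
    simp only [List.reverse_cons, List.foldl_append, List.foldl, ih, zero_add]
    have h1 : List.foldl (· + ·) sz rest = sz + List.foldl (· + ·) 0 rest := by
      simpa using foldl_add_shift rest sz 0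
    omega

theorem pvBackward_append (l1 l2 : List Int) (e : Int) :
    pvBackward (l1 ++ l2) e = pvBackward l1 e ++ pvBackward l2 (e - List.foldl (· + ·) 0 l1) := by
  induction l1 generalizing e with
  | nil => simp [pvBackward]
  | cons sz rest ih =>
    simp only [List.cons_append, pvBackward, ih, List.append_assoc, List.foldl, zero_add]
    have h1 : List.foldl (· + ·) sz rest = sz + List.foldl (· + ·) 0 rest := by
      simpa using foldl_add_shift rest sz 0
    have h2 : e - sz - List.foldl (· + ·) 0 rest = e - List.foldl (· + ·) sz rest := by omega
    rw [h2]

-- B's reversed backward construction is A's loop filtered.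
theorem pvBackward_reverse (sizes : List Int) (start : Int) :
    (pvBackward sizes.reverse (List.foldl (· + ·) start sizes)).reverse =
      (pvLoopA sizes start).1.filter (fun p => p.2 > p.1) := by
  induction sizes generalizing start with
  | nil => rfl
  | cons sz rest ih =>
    simp only [List.reverse_cons, List.foldl, pvBackward_append, List.reverse_append]
    have hrev : List.foldl (· + ·) (0 : Int) rest.reverse = List.foldl (· + ·) 0 rest :=
      foldl_add_reverse rest
    have hsum : List.foldl (· + ·) (start + sz) rest - List.foldl (· + ·) 0 rest.reverse
        = start + sz := by
      have h1 : List.foldl (· + ·) (start + sz) rest = (start + sz) + List.foldl (· + ·) 0 rest := by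
        simpa using foldl_add_shift rest (start + sz) 0
      omega
    rw [hsum]
    simp only [pvLoopA, List.filter_cons]
    by_cases h : sz > 0
    · have h' : decide (start + sz > start) = true := by simpa using h
      simp [pvBackward, h, ih]
    · have h' : decide (start + sz > start) = false := by simpa using h
      simp [pvBackward, h, ih]

-- ===== VERDICT (by name: the statement is the Claim_ definition above) =====
theorem build_slices_spec : Claim_equal_build_slices := by
  intro total sizes ar ce _ _
  unfold Spec_build_slices build_slices build_slices_alt
  by_cases hgt : sizes.foldl (· + ·) 0 > total
  · simp only [if_pos hgt]
    cases ce <;> simp [pvClip_eq]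
  · simp only [if_neg hgt, pvWalkRevLoop_eq, List.reverse_append, pvBackward_reverse sizes 0]
    by_cases h : sizes.foldl (· + ·) 0 < total ∧ ar = true
    · simp [h, List.filter_append, pvLoopA_snd]
    · have h' : ¬ (ar = true ∧ sizes.foldl (· + ·) 0 < total) := by tauto
      simp [h, h']
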